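-- pv_equiv track=rewrite | github.com/sougata-ub/argu-generator | code/trainer_models_v2.py | pad_sequence_3d
-- ===== SOURCE A (Python) =====
-- def pad_sequence_3d(pad, batch):
--     max_len = max([len(j) for i in batch for j in i])
--     max_splits = max([len(i) for i in batch])
--     padded_lst = []
--     for i in batch:
--         if type(i) != list:
--             i = i.tolist()
--         tmp_lst = [j + [pad] * (max_len - len(j)) for j in i]
--         tmp_lst.extend([[pad] * max_len] * (max_splits - len(tmp_lst)))
--         padded_lst.append(tmp_lst)
--     return padded_lst
-- ===== SOURCE B (Python) =====
-- def pad_sequence_3d(pad, batch):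
--     max_len = max([len(j) for i in batch for j in i])
--     max_splits = max([len(i) for i in batch])
--     out = []
--     for i in batch:
--         if type(i) != list:
--             i = i.tolist()
--         grid = [[pad] * max_len for _ in range(max_splits)]
--         for r, row in enumerate(i):
--             for c, v in enumerate(row):
--                 grid[r][c] = v
--         out.append(grid)
--     return out
-- ===== Notes on version B (the rewrite author's own statement) =====
-- stated objective: alternative
-- what changed: Replaced A's per-row concatenate-then-extend padding with preallocating a full max_splits x max_len pad grid per batch element and overwriting its cells by enumerating the existing rows.
import Mathlib
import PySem

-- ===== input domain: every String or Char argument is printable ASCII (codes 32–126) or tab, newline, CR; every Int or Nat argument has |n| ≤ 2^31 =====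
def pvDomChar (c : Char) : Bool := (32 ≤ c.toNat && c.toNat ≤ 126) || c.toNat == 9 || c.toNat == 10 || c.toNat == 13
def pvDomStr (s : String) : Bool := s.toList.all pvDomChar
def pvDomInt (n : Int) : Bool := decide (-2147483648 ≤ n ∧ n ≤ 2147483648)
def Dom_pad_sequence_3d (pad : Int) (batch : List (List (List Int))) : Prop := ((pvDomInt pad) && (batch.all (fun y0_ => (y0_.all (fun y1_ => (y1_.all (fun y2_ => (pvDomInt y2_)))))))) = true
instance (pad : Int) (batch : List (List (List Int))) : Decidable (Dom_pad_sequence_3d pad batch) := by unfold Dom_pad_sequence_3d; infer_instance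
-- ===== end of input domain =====

-- B preallocates a max_splits × max_len pad grid per batch element and overwrites its cells
-- by enumerating the existing rows, instead of A's per-row concatenate-then-extend padding
-- (alternative decomposition, same cost).

-- ===== PORT A =====
-- Python's max(list) raises ValueError on an empty list; the 'none' branch of max? is
-- unreachable under Pre_, so '.getD 0' is never the returned value there.
-- The 'type(i) != list: i = i.tolist()' branch never fires for list inputs (the stated domain).
def pad_sequence_3d (pad : Int) (batch : List (List (List Int))) : List (List (List Int)) :=
  let max_len : Int :=
    (PySem.List.max? (batch.flatMap (fun i => i.map (fun j => (j.length : Int)))) (fun x => x)).getD 0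
  let max_splits : Int :=
    (PySem.List.max? (batch.map (fun i => (i.length : Int))) (fun x => x)).getD 0
  batch.foldl (fun padded_lst i =>
    let tmp_lst := i.map (fun j => j ++ List.replicate (max_len - (j.length : Int)).toNat pad)
    let tmp_lst2 := tmp_lst ++
      List.replicate (max_splits - (tmp_lst.length : Int)).toNat (List.replicate max_len.toNat pad)
    padded_lst ++ [tmp_lst2]) []

-- ===== PORT B =====
-- inner loop of Source B: for c, v in enumerate(row): grid[r][c] = v
def pvFillRow (row g : List Int) : List Int :=
  row.zipIdx.foldl (fun gr vp => gr.set vp.2 vp.1) g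

-- outer loop of Source B: for r, row in enumerate(i): <inner loop>
def pvFillGrid (i g : List (List Int)) : List (List Int) :=
  i.zipIdx.foldl (fun g rp => g.set rp.2 (pvFillRow rp.1 (g.getD rp.2 []))) g

def pad_sequence_3d_alt (pad : Int) (batch : List (List (List Int))) : List (List (List Int)) :=
  let max_len : Int :=
    (PySem.List.max? (batch.flatMap (fun i => i.map (fun j => (j.length : Int)))) (fun x => x)).getD 0
  let max_splits : Int :=
    (PySem.List.max? (batch.map (fun i => (i.length : Int))) (fun x => x)).getD 0
  batch.foldl (fun out i =>
    let grid0 := List.replicate max_splits.toNat (List.replicate max_len.toNat pad)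
    out ++ [pvFillGrid i grid0]) []

-- ===== PRECONDITION & SPEC =====
-- Pre_ excludes exactly the inputs where Python A raises ValueError: batch = [] or all
-- elements of batch empty (max() of an empty list); B raises there too.
def Pre_pad_sequence_3d (pad : Int) (batch : List (List (List Int))) : Prop :=
  ∃ i ∈ batch, i ≠ []
instance (pad : Int) (batch : List (List (List Int))) : Decidable (Pre_pad_sequence_3d pad batch) := by unfold Pre_pad_sequence_3d; infer_instance

def pvWitness_pad_sequence_3d : Int × List (List (List Int)) := (0, [[[1]]])

def Spec_pad_sequence_3d (pad : Int) (batch : List (List (List Int))) (out : List (List (List Int))) : Prop := out = pad_sequence_3d_alt pad batch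
instance (pad : Int) (batch : List (List (List Int))) (out : List (List (List Int))) : Decidable (Spec_pad_sequence_3d pad batch out) := by unfold Spec_pad_sequence_3d; infer_instance

-- ===== CLAIM (what is proved, stated in full; the proofs are below) =====
def Claim_equal_pad_sequence_3d : Prop := ∀ (pad : Int) (batch : List (List (List Int))), Dom_pad_sequence_3d pad batch → Pre_pad_sequence_3d pad batch → Spec_pad_sequence_3d pad batch (pad_sequence_3d pad batch)

-- ===== LEMMAS AND PROOFS =====

-- any element of xs is ≤ Python's max(xs) (= (max? xs id).getD 0 whenever xs ≠ [])
theorem pv_le_max_getD (xs : List Int) (x : Int) (h : x ∈ xs) :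
    x ≤ (PySem.List.max? xs (fun y => y)).getD 0 := by
  cases hx : PySem.List.max? xs (fun y => y) with
  | none =>
    rw [PySem.List.max?_eq_none_iff] at hx
    subst hx; cases h
  | some m =>
    simpa using PySem.List.max?_isMax hx x h

-- writing at indices k+1, k+2, … leaves the head untouched
theorem pvFillRow_shift (row : List Int) (k : Nat) (b : Int) (t : List Int) :
    (row.zipIdx (k+1)).foldl (fun gr vp => gr.set vp.2 vp.1) (b :: t)
      = b :: (row.zipIdx k).foldl (fun gr vp => gr.set vp.2 vp.1) t := by
  induction row generalizing k t with
  | nil => simp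
  | cons v rest ih =>
    rw [List.zipIdx_cons, List.zipIdx_cons, List.foldl_cons, List.foldl_cons]
    show List.foldl _ ((b :: t).set (k+1) v) _ = _
    simpa [List.set] using ih (k+1) (t.set k v)

-- overwriting the front of base with row yields row ++ (rest of base)
theorem pvFillRow_eq (row base : List Int) (h : row.length ≤ base.length) :
    pvFillRow row base = row ++ base.drop row.length := by
  induction row generalizing base with
  | nil => simp [pvFillRow]
  | cons v rest ih =>
    cases base with
    | nil => simp at h
    | cons b t =>
      simp only [pvFillRow, List.zipIdx_cons, List.foldl_cons, List.set]
      rw [pvFillRow_shift]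
      have := ih t (by simpa using h)
      simp only [pvFillRow] at this
      simp [this]

theorem pvFillGrid_shift (i : List (List Int)) (k : Nat) (b : List Int) (t : List (List Int)) :
    (i.zipIdx (k+1)).foldl (fun g rp => g.set rp.2 (pvFillRow rp.1 (g.getD rp.2 []))) (b :: t)
      = b :: (i.zipIdx k).foldl (fun g rp => g.set rp.2 (pvFillRow rp.1 (g.getD rp.2 []))) t := by
  induction i generalizing k t with
  | nil => simp
  | cons row rest ih =>
    rw [List.zipIdx_cons, List.zipIdx_cons, List.foldl_cons, List.foldl_cons]
    show List.foldl _ ((b :: t).set (k+1) (pvFillRow row ((b :: t).getD (k+1) []))) _ = _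
    simpa [List.set, List.getD] using ih (k+1) (t.set k (pvFillRow row (t.getD k [])))

-- filling a grid whose rows are all P in order 0,1,… pads each row of i and keeps the tail
theorem pvFillGrid_eq (i : List (List Int)) (g : List (List Int)) (P : List Int)
    (hlen : i.length ≤ g.length)
    (hg : ∀ r ∈ g, r = P)
    (hrow : ∀ row ∈ i, row.length ≤ P.length) :
    pvFillGrid i g = i.map (fun row => row ++ P.drop row.length) ++ g.drop i.length := by
  induction i generalizing g with
  | nil => simp [pvFillGrid]
  | cons row rest ih =>
    cases g with
    | nil => simp at hlen
    | cons g0 t =>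
      have hg0 : g0 = P := hg g0 (by simp)
      simp only [pvFillGrid, List.zipIdx_cons, List.foldl_cons]
      rw [show (g0 :: t).set 0 (pvFillRow row ((g0 :: t).getD 0 [])) = pvFillRow row g0 :: t from rfl]
      rw [pvFillGrid_shift]
      have hrest := ih t (by simpa using hlen)
        (fun r hr => hg r (List.mem_cons_of_mem _ hr))
        (fun r hr => hrow r (List.mem_cons_of_mem _ hr))
      simp only [pvFillGrid] at hrest
      rw [hrest, hg0, pvFillRow_eq row P (hrow row (by simp))]
      simp

-- ===== VERDICT (by name: the statement is the Claim_ definition above) =====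
theorem pad_sequence_3d_spec : Claim_equal_pad_sequence_3d := by
  intro pad batch _ _
  unfold Spec_pad_sequence_3d
  simp only [pad_sequence_3d, pad_sequence_3d_alt]
  set L : Int := (PySem.List.max? (batch.flatMap (fun i => i.map (fun j => (j.length : Int)))) (fun x => x)).getD 0 with hL
  set S : Int := (PySem.List.max? (batch.map (fun i => (i.length : Int))) (fun x => x)).getD 0 with hS
  -- both sides append one element per batch element; compare them elementwise
  apply PySem.List.foldl_congr_mem
  intro acc i hi
  congr 1
  -- per-element equality: A's padded rows = B's overwritten grid
  have hSi : (i.length : Int) ≤ S := by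
    exact pv_le_max_getD _ _ (List.mem_map_of_mem hi)
  have hrow : ∀ row ∈ i, row.length ≤ L.toNat := by
    intro row hr
    have : (row.length : Int) ≤ L := by
      refine pv_le_max_getD _ _ ?_
      exact List.mem_flatMap.mpr ⟨i, hi, List.mem_map_of_mem hr⟩
    omega
  rw [pvFillGrid_eq i (List.replicate S.toNat (List.replicate L.toNat pad))
        (List.replicate L.toNat pad)
        (by simp; omega)
        (fun r hr => List.eq_of_mem_replicate hr)
        (by simpa [List.length_replicate] using hrow)]
  have hmap : (i.map fun j => j ++ List.replicate (L - (j.length : Int)).toNat pad)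
      = i.map (fun row => row ++ (List.replicate L.toNat pad).drop row.length) := by
    refine List.map_congr_left ?_
    intro row hr
    have h1 := hrow row hr
    rw [List.drop_replicate,
      show (L - (row.length : Int)).toNat = L.toNat - row.length by omega]
  have hcnt : (S - ((i.map fun j => j ++ List.replicate (L - (j.length : Int)).toNat pad).length : Int)).toNat
      = S.toNat - i.length := by
    simp only [List.length_map]
    omega
  rw [hcnt, hmap, List.drop_replicate]
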